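-- pv_equiv track=rewrite | github.com/PureAutumnStars/Lab1-2021112284 | source_code/Routing.py | if_quit_by_repeated_edge
-- ===== SOURCE A (Python) =====
-- def if_quit_by_repeated_edge(word_list, addr_list):
--     """
--     判断是否终止随机游走，条件：出现重复的边
--     :param word_list: 当前已游走经过的单词形成的列表
--     :param addr_list: 当前词在word_list中的位置形成的列表
--     :return: quit_flag: True or False
--     """
--     front_word_list = []
--     quit_flag = False
--     if addr_list[0] > 0:
--         front_word_list.append(word_list[addr_list[0] - 1])
--         for i in range(1, len(addr_list)):
--             front_word = word_list[addr_list[i] - 1]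
--             if front_word in front_word_list:
--                 quit_flag = True
--             else:
--                 front_word_list.append(front_word)
--     elif addr_list[0] == 0 and len(addr_list) > 2:
--         front_word_list.append(word_list[addr_list[1] - 1])
--         for i in range(2, len(addr_list)):
--             front_word = word_list[addr_list[i] - 1]
--             if front_word in front_word_list:
--                 quit_flag = True
--             else:
--                 front_word_list.append(front_word)
--
--     return quit_flag
-- ===== SOURCE B (Python) =====
-- def if_quit_by_repeated_edge(word_list, addr_list):
--     if addr_list[0] > 0:
--         start = 0
--     elif addr_list[0] == 0 and len(addr_list) > 2:
--         start = 1
--     else: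
--         return False
--     fronts = sorted(word_list[a - 1] for a in addr_list[start:])
--     return any(x == y for x, y in zip(fronts, fronts[1:]))
-- ===== Notes on version B (the rewrite author's own statement) =====
-- stated objective: alternative
-- what changed: A's incremental seen-list membership loop with a flag is replaced by sort-then-adjacent-scan: pick the start index, map every address to its predecessor word, sort the resulting list, and report a repeat iff some adjacent pair of the sorted list is equal.
import Mathlib
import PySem

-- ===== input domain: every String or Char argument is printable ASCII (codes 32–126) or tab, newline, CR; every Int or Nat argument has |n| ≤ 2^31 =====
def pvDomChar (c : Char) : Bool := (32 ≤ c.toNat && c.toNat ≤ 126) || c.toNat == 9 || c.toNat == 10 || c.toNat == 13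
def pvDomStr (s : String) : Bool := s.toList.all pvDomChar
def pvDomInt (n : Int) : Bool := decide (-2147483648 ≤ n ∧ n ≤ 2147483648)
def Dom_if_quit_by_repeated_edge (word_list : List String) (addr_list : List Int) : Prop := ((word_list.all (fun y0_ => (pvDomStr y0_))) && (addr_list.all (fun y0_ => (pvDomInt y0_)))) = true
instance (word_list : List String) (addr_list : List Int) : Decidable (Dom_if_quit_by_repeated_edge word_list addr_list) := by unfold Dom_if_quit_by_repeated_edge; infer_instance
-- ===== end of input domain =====

-- B replaces A's incremental seen-list membership loop with sort-then-adjacent-scan: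
-- map every address to its predecessor word, sort, and report a repeat iff some
-- adjacent sorted pair is equal (objective: alternative algorithm).

-- ===== PORT A =====
-- one iteration of A's loop body: look up word_list[a-1], set the flag or extend the seen list
def pvStep (word_list : List String) (st : List String × Bool) (a : Int) : List String × Bool :=
  let front_word := PySem.List.pyGetD word_list (a - 1) ""
  if front_word ∈ st.1 then (st.1, true) else (st.1 ++ [front_word], st.2)

def if_quit_by_repeated_edge (word_list : List String) (addr_list : List Int) : Bool :=
  let a0 := PySem.List.pyGetD addr_list 0 0
  if 0 < a0 then
    ((PySem.List.pyRange 1 (addr_list.length : Int) 1).foldl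
      (fun st i => pvStep word_list st (PySem.List.pyGetD addr_list i 0))
      ([PySem.List.pyGetD word_list (a0 - 1) ""], false)).2
  else if a0 = 0 ∧ 2 < addr_list.length then
    ((PySem.List.pyRange 2 (addr_list.length : Int) 1).foldl
      (fun st i => pvStep word_list st (PySem.List.pyGetD addr_list i 0))
      ([PySem.List.pyGetD word_list (PySem.List.pyGetD addr_list 1 0 - 1) ""], false)).2
  else false

-- ===== PORT B =====
def if_quit_by_repeated_edge_alt (word_list : List String) (addr_list : List Int) : Bool :=
  let a0 := PySem.List.pyGetD addr_list 0 0
  let start? : Option Int :=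
    if 0 < a0 then some 0
    else if a0 = 0 ∧ 2 < addr_list.length then some 1
    else none
  match start? with
  | none => false
  | some s =>
    let fronts := PySem.List.sorted
      ((PySem.List.slice addr_list (some s) none).map
        (fun a => PySem.List.pyGetD word_list (a - 1) "")) (fun x => x) false
    (fronts.zip (PySem.List.slice fronts (some 1) none)).any (fun p => p.1 == p.2)

-- ===== PRECONDITION & SPEC =====
-- Pre_ excludes exactly the inputs on which Python A raises IndexError:
-- an empty addr_list, or an address a (among those A dereferences) with a-1 outside
-- the Python index range of word_list.
def Pre_if_quit_by_repeated_edge (word_list : List String) (addr_list : List Int) : Prop :=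
  addr_list ≠ [] ∧
  (0 < addr_list.headI → ∀ a ∈ addr_list, PySem.Raise.InRange word_list.length (a - 1)) ∧
  (addr_list.headI = 0 ∧ 2 < addr_list.length → ∀ a ∈ addr_list.tail, PySem.Raise.InRange word_list.length (a - 1))
instance (word_list : List String) (addr_list : List Int) : Decidable (Pre_if_quit_by_repeated_edge word_list addr_list) := by unfold Pre_if_quit_by_repeated_edge; infer_instance
def pvWitness_if_quit_by_repeated_edge : List String × List Int := (["a", "b", "c"], [1, 2, 1, 2])

def Spec_if_quit_by_repeated_edge (word_list : List String) (addr_list : List Int) (out : Bool) : Prop := out = if_quit_by_repeated_edge_alt word_list addr_list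
instance (word_list : List String) (addr_list : List Int) (out : Bool) : Decidable (Spec_if_quit_by_repeated_edge word_list addr_list out) := by unfold Spec_if_quit_by_repeated_edge; infer_instance

-- ===== CLAIM (what is proved, stated in full; the proofs are below) =====
def Claim_equal_if_quit_by_repeated_edge : Prop := ∀ (word_list : List String) (addr_list : List Int), Dom_if_quit_by_repeated_edge word_list addr_list → Pre_if_quit_by_repeated_edge word_list addr_list → Spec_if_quit_by_repeated_edge word_list addr_list (if_quit_by_repeated_edge word_list addr_list)

-- ===== LEMMAS AND PROOFS =====

-- A's loop flag is true iff seen ++ (mapped words) has a duplicate (given seen has none).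
theorem pvScan_flag (wl : List String) (l : List Int) (seen : List String) (b : Bool)
    (h : seen.Nodup) :
    (l.foldl (pvStep wl) (seen, b)).2
      = (b || !decide ((seen ++ l.map (fun a => PySem.List.pyGetD wl (a - 1) "")).Nodup)) := by
  induction l generalizing seen b with
  | nil => simp [h]
  | cons a rest ih =>
    by_cases hm : PySem.List.pyGetD wl (a - 1) "" ∈ seen
    · have hstep : (List.foldl (pvStep wl) (seen, b) (a :: rest)).2
          = (rest.foldl (pvStep wl) (seen, true)).2 := by
        simp [pvStep, hm]
      rw [hstep, ih seen true h]
      have hnd : ¬ (seen ++ PySem.List.pyGetD wl (a - 1) "" ::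
          rest.map (fun a => PySem.List.pyGetD wl (a - 1) "")).Nodup := by
        intro hn
        rcases List.nodup_append.1 hn with ⟨-, -, hdisj⟩
        exact hdisj _ hm _ (List.mem_cons_self ..) rfl
      simp [hnd]
    · have h' : (seen ++ [PySem.List.pyGetD wl (a - 1) ""]).Nodup := by
        rw [List.nodup_append]
        exact ⟨h, List.nodup_singleton _, by
          intro x hx y hy; simp at hy; subst hy
          intro he; subst he; exact hm hx⟩
      have hstep : (List.foldl (pvStep wl) (seen, b) (a :: rest)).2
          = (rest.foldl (pvStep wl) (seen ++ [PySem.List.pyGetD wl (a - 1) ""], b)).2 := by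
        simp [pvStep, hm]
      rw [hstep, ih _ b h']
      simp only [List.map_cons, List.append_assoc, List.singleton_append]
      rfl

-- on a (≤)-sorted list, some adjacent pair is equal iff the list has a duplicate
theorem pvAdjDup_pairwise (l : List String) (h : l.Pairwise (· ≤ ·)) :
    (l.zip l.tail).any (fun p => p.1 == p.2) = !decide l.Nodup := by
  induction l with
  | nil => simp
  | cons a t ih =>
    cases t with
    | nil => simp
    | cons b t' =>
      rcases List.pairwise_cons.1 h with ⟨hab, ht⟩
      by_cases he : a = b
      · subst he
        have : ¬ (a :: a :: t').Nodup := by simp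
        simp [this]
      · have hnm : a ∉ b :: t' := by
          intro hmem
          rcases List.mem_cons.1 hmem with h1 | h2
          · exact he h1
          · have hb : a ≤ b := hab b (by simp)
            have hbx : b ≤ a := (List.pairwise_cons.1 ht).1 a h2
            exact he (le_antisymm hb hbx)
        have hzip : ((a :: b :: t').zip (a :: b :: t').tail).any (fun p => p.1 == p.2)
            = ((a == b) || ((b :: t').zip (b :: t').tail).any (fun p => p.1 == p.2)) := by
          simp [List.zip]
        rw [hzip, ih ht]
        have : (a :: b :: t').Nodup ↔ (b :: t').Nodup := by
          constructor
          · exact fun hn => (List.nodup_cons.1 hn).2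
          · exact fun hn => List.nodup_cons.2 ⟨hnm, hn⟩
        by_cases hn : (b :: t').Nodup <;> simp [hn, this, he]

-- B's sorted adjacent test decides duplication of the unsorted list
theorem pvSortDup (xs : List String) :
    (((PySem.List.sorted xs (fun x => x) false).zip
        (PySem.List.sorted xs (fun x => x) false).tail).any (fun p => p.1 == p.2))
      = !decide xs.Nodup := by
  have hp : (PySem.List.sorted xs (fun x => x) false).Pairwise (· ≤ ·) :=
    PySem.List.sorted_pairwise xs (fun x => x)
  rw [pvAdjDup_pairwise _ hp]
  have hperm : (PySem.List.sorted xs (fun x => x) false).Perm xs :=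
    PySem.List.sorted_perm xs (fun x => x) false
  by_cases hn : xs.Nodup
  · simp [hperm.nodup_iff.2 hn, hn]
  · have : ¬ (PySem.List.sorted xs (fun x => x) false).Nodup := fun h => hn (hperm.nodup_iff.1 h)
    simp [this, hn]

-- ===== VERDICT (by name: the statement is the Claim_ definition above) =====
theorem if_quit_by_repeated_edge_spec : Claim_equal_if_quit_by_repeated_edge := by
  intro wl al _ hpre
  rcases hpre with ⟨hne, -, -⟩
  unfold Spec_if_quit_by_repeated_edge
  rcases al with _ | ⟨a0, rest⟩
  · exact absurd rfl hne
  unfold if_quit_by_repeated_edge if_quit_by_repeated_edge_alt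
  simp only [PySem.List.pyGetD_zero_cons]
  by_cases h1 : 0 < a0
  · simp only [if_pos h1]
    rw [PySem.List.foldl_pyRange_pyGetD' (a0 :: rest) 0
        (fun st a => pvStep wl st a) _ (a := 1) (by omega)]
    rw [pvScan_flag wl _ _ _ (List.nodup_singleton _)]
    simp only [PySem.List.slice_zero_start, PySem.List.slice_none_none,
      PySem.List.slice_from_one]
    rw [pvSortDup]
    simp only [Int.toNat_one, List.drop_one, List.tail_cons, List.map_cons,
      Bool.false_or, List.singleton_append]
    rfl
  · by_cases h2 : a0 = 0 ∧ 2 < (a0 :: rest).length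
    · simp only [if_neg h1, if_pos h2]
      rcases rest with _ | ⟨a1, rest'⟩
      · exact absurd h2.2 (by simp)
      rw [PySem.List.foldl_pyRange_pyGetD' (a0 :: a1 :: rest') 0
          (fun st a => pvStep wl st a) _ (a := 2) (by omega)]
      rw [pvScan_flag wl _ _ _ (List.nodup_singleton _)]
      rw [PySem.List.slice_from_one, PySem.List.slice_from_one]
      rw [pvSortDup]
      have ha1 : PySem.List.pyGetD (a0 :: a1 :: rest') 1 0 = a1 := by
        simp [PySem.List.pyGetD, PySem.List.pyGet?, PySem.List.pyIdx?]
      rw [ha1]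
      have hdrop : (List.drop (Int.toNat 2) (a0 :: a1 :: rest')) = rest' := rfl
      rw [hdrop]
      simp only [List.tail_cons, List.map_cons, Bool.false_or, List.singleton_append]
      rfl
    · simp only [if_neg h1, if_neg h2]
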